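-- pv_equiv track=rewrite | github.com/gongshuang33/PythonScripts | ONT数据合并及其质控/DataMerge/scripts/ont_qc_info.py | ultralong
-- ===== SOURCE A (Python) =====
-- def ultralong(_length_list):
-- 	_ultralong = dict()
-- 	# >50kb，>100kb，>150kb，>200kb，>300kb，>400kb，>500kb的产量及reads数
-- 	data = dict()
-- 	for length in _length_list:
-- 		key = int((length - 1) / 10000)
-- 		data.setdefault(key, [0, 0])
-- 		data[key][0] += int(length)
-- 		data[key][1] += 1
-- 	for threshold in [5, 10,12, 15, 20, 30, 40, 50]:
-- 		level = '>%d0kb' % threshold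
-- 		_ultralong.setdefault(level, {'base_num':0, 'read_num':0})
-- 		for key, value in data.items():
-- 			if key >= threshold:
-- 				_ultralong[level]['base_num'] += value[0]
-- 				_ultralong[level]['read_num'] += value[1]
-- 	return _ultralong
-- ===== SOURCE B (Python) =====
-- def ultralong(_length_list):
--     result = dict()
--     for threshold in [5, 10, 12, 15, 20, 30, 40, 50]:
--         base_num = 0
--         read_num = 0
--         for length in _length_list:
--             if int((length - 1) / 10000) >= threshold:
--                 base_num += int(length)
--                 read_num += 1
--         result['>%d0kb' % threshold] = {'base_num': base_num, 'read_num': read_num}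
--     return result
-- ===== Notes on version B (the rewrite author's own statement) =====
-- stated objective: simpler
-- what changed: B drops A's intermediate 10kb-bucket dict (group-then-aggregate) and instead accumulates base_num/read_num for each of the 8 threshold levels directly from the length list.
import Mathlib
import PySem

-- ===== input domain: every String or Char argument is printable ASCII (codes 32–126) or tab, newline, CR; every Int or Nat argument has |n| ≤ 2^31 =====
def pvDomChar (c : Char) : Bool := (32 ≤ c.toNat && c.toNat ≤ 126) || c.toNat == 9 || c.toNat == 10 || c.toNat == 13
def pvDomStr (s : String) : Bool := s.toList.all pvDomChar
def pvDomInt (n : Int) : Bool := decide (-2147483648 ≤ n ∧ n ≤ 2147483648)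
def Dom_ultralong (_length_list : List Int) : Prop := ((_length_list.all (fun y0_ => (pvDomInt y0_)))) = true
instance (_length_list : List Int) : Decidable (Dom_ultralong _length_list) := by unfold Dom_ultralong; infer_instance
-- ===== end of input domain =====

-- B drops A's intermediate 10kb-bucket dict and accumulates each threshold level
-- directly from the length list (simpler data flow, same exact output).

-- ===== PORT A =====
-- helpers shared by both ports (both Pythons contain these same two expressions):
-- '>%d0kb' % t, and int((length - 1) / 10000) — the float division then int() is
-- exact truncated division (PySem.Int.truncdiv) for |length| ≤ 2^31 (Dom).
def pvLevel (t : Int) : String := ">" ++ PySem.Int.toStr t ++ "0kb"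
def pvKey (length : Int) : Int := PySem.Int.truncdiv (length - 1) 10000

-- body of A's first loop: data.setdefault(key,[0,0]); data[key][0] += int(length); data[key][1] += 1
def pvDataStep (data : PySem.Dict Int (Int × Int)) (length : Int) : PySem.Dict Int (Int × Int) :=
  let key := pvKey length
  let data := data.setdefault key (0, 0)
  let v := data.getD key (0, 0)
  data.insert key (v.1 + length, v.2 + 1)

-- body of A's inner loop over data.items(); the level key is always present, so the
-- `modify` default (empty) is never used — it stands for Python's _ultralong[level] lookup
def pvInnerStep (threshold : Int) (level : String)
    (ult : PySem.Dict String (PySem.Dict String Int)) (kv : Int × (Int × Int)) :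
    PySem.Dict String (PySem.Dict String Int) :=
  if kv.1 ≥ threshold then
    let ult := ult.modify level PySem.Dict.empty (fun d => d.modify "base_num" 0 (· + kv.2.1))
    ult.modify level PySem.Dict.empty (fun d => d.modify "read_num" 0 (· + kv.2.2))
  else ult

-- body of A's loop over the thresholds
def pvOuterStep (data : PySem.Dict Int (Int × Int))
    (ult : PySem.Dict String (PySem.Dict String Int)) (threshold : Int) :
    PySem.Dict String (PySem.Dict String Int) :=
  let level := pvLevel threshold
  let ult := ult.setdefault level (PySem.Dict.ofList [("base_num", 0), ("read_num", 0)])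
  data.items.foldl (pvInnerStep threshold level) ult

def ultralong (_length_list : List Int) : List (String × List (String × Int)) :=
  let data := _length_list.foldl pvDataStep PySem.Dict.empty
  let ult := [5, 10, 12, 15, 20, 30, 40, 50].foldl (pvOuterStep data) PySem.Dict.empty
  ult.items.map (fun p => (p.1, p.2.items))

-- ===== PORT B =====
-- body of B's inner loop: two plain accumulators (base_num, read_num)
def pvAltStep (threshold : Int) (s : Int × Int) (length : Int) : Int × Int :=
  if pvKey length ≥ threshold then (s.1 + length, s.2 + 1) else s

def ultralong_alt (_length_list : List Int) : List (String × List (String × Int)) :=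
  let result := [5, 10, 12, 15, 20, 30, 40, 50].foldl
    (fun result threshold =>
      let s := _length_list.foldl (pvAltStep threshold) (0, 0)
      result.insert (pvLevel threshold)
        (PySem.Dict.ofList [("base_num", s.1), ("read_num", s.2)]))
    (PySem.Dict.empty : PySem.Dict String (PySem.Dict String Int))
  result.items.map (fun p => (p.1, p.2.items))

-- ===== PRECONDITION & SPEC =====
def Spec_ultralong (_length_list : List Int) (out : List (String × List (String × Int))) : Prop := out = ultralong_alt _length_list
instance (_length_list : List Int) (out : List (String × List (String × Int))) : Decidable (Spec_ultralong _length_list out) := by unfold Spec_ultralong; infer_instance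

-- ===== CLAIM (what is proved, stated in full; the proofs are below) =====
def Claim_equal_ultralong : Prop := ∀ (_length_list : List Int), Dom_ultralong _length_list → Spec_ultralong _length_list (ultralong _length_list)

-- ===== LEMMAS AND PROOFS =====

def pvDir (t : Int) (xs : List Int) : Int × Int :=
  ((xs.filter (fun l => pvKey l ≥ t)).map (fun l => (l, (1 : Int)))).sum
def pvIts (t : Int) (its : List (Int × (Int × Int))) : Int × Int :=
  ((its.filter (fun kv => kv.1 ≥ t)).map (·.2)).sum

lemma pvIts_cons (t : Int) (p : Int × (Int × Int)) (its : List (Int × (Int × Int))) :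
    pvIts t (p :: its) = (if p.1 ≥ t then p.2 else 0) + pvIts t its := by
  by_cases h : p.1 ≥ t <;> simp [pvIts, List.filter_cons, h]

lemma pvDir_cons (t l : Int) (xs : List Int) :
    pvDir t (l :: xs) = (if pvKey l ≥ t then ((l, 1) : Int × Int) else 0) + pvDir t xs := by
  by_cases h : pvKey l ≥ t <;> simp [pvDir, List.filter_cons, h]

lemma pv_map_replace_of_not_mem {κ ν : Type} [BEq κ] [LawfulBEq κ] (k : κ) (w : ν) :
    ∀ (its : List (κ × ν)), (∀ q ∈ its, q.1 ≠ k) →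
      its.map (fun p => if p.1 == k then (k, w) else p) = its := by
  intro its h
  induction its with
  | nil => rfl
  | cons p rest ih =>
    simp only [List.map_cons]
    rw [if_neg (by simp [h p (by simp)]), ih (fun q hq => h q (by simp [hq]))]

lemma pv_insert_get?_self {κ ν : Type} [BEq κ] [LawfulBEq κ]
    (d : PySem.Dict κ ν) (k : κ) (v : ν) (hnd : d.keys.Nodup) (h : d.get? k = some v) :
    d.insert k v = d := by
  have hc : d.contains k = true := by
    rw [PySem.Dict.contains_eq_isSome_get?, h]; rfl
  apply PySem.Dict.ext
  rw [PySem.Dict.items_insert_of_contains _ _ hc]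
  have hmem : (k, v) ∈ d.items := PySem.Dict.mem_items_of_get?_eq_some _ h
  clear h hc
  have hnd' : (d.items.map Prod.fst).Nodup := by
    simpa [PySem.Dict.keys] using hnd
  generalize d.items = its at *
  induction its with
  | nil => rfl
  | cons p rest ih =>
    simp only [List.map_cons, List.nodup_cons] at hnd'
    simp only [List.map_cons]
    rcases List.mem_cons.mp hmem with hp | hr
    · subst hp
      rw [if_pos (by simp),
        pv_map_replace_of_not_mem _ _ _ (fun q hq e => hnd'.1 (by simpa [← e] using List.mem_map_of_mem (f := Prod.fst) hq))]
    · have hpk : p.1 ≠ k := fun e => hnd'.1 (by simpa [← e] using List.mem_map_of_mem (f := Prod.fst) hr)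
      rw [if_neg (by simp [hpk]), ih hr hnd'.2]

lemma pvIts_replace (t : Int) (k : Int) (v w : Int × Int) :
    ∀ (its : List (Int × (Int × Int))), (its.map Prod.fst).Nodup → (k, v) ∈ its →
      pvIts t (its.map (fun p => if p.1 == k then (k, w) else p))
        = pvIts t its + (if k ≥ t then w - v else 0) := by
  intro its hnd hmem
  induction its with
  | nil => simp at hmem
  | cons p rest ih =>
    simp only [List.map_cons, List.nodup_cons] at hnd
    simp only [List.map_cons]
    rcases List.mem_cons.mp hmem with hp | hr
    · subst hp
      rw [if_pos (by simp),
        pv_map_replace_of_not_mem _ _ _ (fun q hq e => hnd.1 (by simpa [← e] using List.mem_map_of_mem (f := Prod.fst) hq)),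
        pvIts_cons, pvIts_cons]
      by_cases h : k ≥ t <;> simp [h] <;> abel
    · have hpk : p.1 ≠ k := fun e => hnd.1 (by simpa [← e] using List.mem_map_of_mem (f := Prod.fst) hr)
      rw [if_neg (by simp [hpk]), pvIts_cons, pvIts_cons, ih hnd.2 hr]
      abel

lemma pv_alt_fold (t : Int) :
    ∀ (xs : List Int) (s : Int × Int), xs.foldl (pvAltStep t) s = s + pvDir t xs := by
  intro xs
  induction xs with
  | nil => intro s; simp [pvDir]
  | cons l rest ih =>
    intro s
    rw [List.foldl_cons, pvDir_cons]
    by_cases h : pvKey l ≥ t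
    · rw [show pvAltStep t s l = s + (l, 1) from by simp [pvAltStep, h, Prod.ext_iff], ih]
      simp [h]; abel
    · rw [show pvAltStep t s l = s from by simp [pvAltStep, h], ih]
      simp [h]

lemma pvDataStep_nodup (d : PySem.Dict Int (Int × Int)) (l : Int) (h : d.keys.Nodup) :
    (pvDataStep d l).keys.Nodup := by
  simp only [pvDataStep]
  by_cases hc : d.contains (pvKey l) = true
  · rw [PySem.Dict.setdefault_of_contains _ _ hc]
    exact PySem.Dict.nodup_keys_insert _ _ _ h
  · rw [PySem.Dict.setdefault_of_not_contains _ _ (by simpa using hc)]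
    exact PySem.Dict.nodup_keys_insert _ _ _ (PySem.Dict.nodup_keys_insert _ _ _ h)

lemma pvIts_dataStep (t : Int) (d : PySem.Dict Int (Int × Int)) (l : Int) (hnd : d.keys.Nodup) :
    pvIts t (pvDataStep d l).items
      = pvIts t d.items + (if pvKey l ≥ t then ((l, 1) : Int × Int) else 0) := by
  simp only [pvDataStep]
  by_cases hc : d.contains (pvKey l) = true
  · rw [PySem.Dict.setdefault_of_contains _ _ hc]
    obtain ⟨v, hv⟩ : ∃ v, d.get? (pvKey l) = some v := by
      have := PySem.Dict.contains_eq_isSome_get? d (pvKey l)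
      rw [hc] at this
      exact Option.isSome_iff_exists.mp this.symm
    rw [PySem.Dict.getD_of_get?_eq_some d (0,0) hv,
        PySem.Dict.items_insert_of_contains _ _ hc]
    have hmem : (pvKey l, v) ∈ d.items := PySem.Dict.mem_items_of_get?_eq_some _ hv
    have hnd' : (d.items.map Prod.fst).Nodup := by simpa [PySem.Dict.keys] using hnd
    rw [pvIts_replace t (pvKey l) v (v.1 + l, v.2 + 1) d.items hnd' hmem]
    by_cases h : pvKey l ≥ t <;> simp [h, Prod.ext_iff]
  · rw [PySem.Dict.setdefault_of_not_contains _ _ (by simpa using hc)]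
    rw [PySem.Dict.getD_insert_self]
    rw [PySem.Dict.insert_insert_self]
    rw [PySem.Dict.items_insert_of_not_contains _ _ (by simpa using hc)]
    by_cases h : pvKey l ≥ t <;>
      simp [pvIts, List.filter_append, List.map_append, h]

lemma pvIts_build (t : Int) :
    ∀ (xs : List Int) (d : PySem.Dict Int (Int × Int)), d.keys.Nodup →
      pvIts t ((xs.foldl pvDataStep d).items) = pvIts t d.items + pvDir t xs := by
  intro xs
  induction xs with
  | nil => intro d _; simp [pvDir]
  | cons l rest ih =>
    intro d hnd
    rw [List.foldl_cons, ih _ (pvDataStep_nodup d l hnd), pvIts_dataStep t d l hnd, pvDir_cons]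
    abel

lemma pv_modify_eq {κ ν : Type} [BEq κ] (d : PySem.Dict κ ν) (k : κ) (d0 : ν) (f : ν → ν) :
    d.modify k d0 f = d.insert k (f (d.getD k d0)) := rfl

lemma pv_inner (t : Int) (level : String) :
    ∀ (its : List (Int × (Int × Int))) (ult : PySem.Dict String (PySem.Dict String Int)) (p : Int × Int),
      ult.keys.Nodup →
      ult.get? level = some (PySem.Dict.ofList [("base_num", p.1), ("read_num", p.2)]) →
      its.foldl (pvInnerStep t level) ult
        = ult.insert level (PySem.Dict.ofList
            [("base_num", (p + pvIts t its).1), ("read_num", (p + pvIts t its).2)]) := by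
  intro its
  induction its with
  | nil =>
    intro ult p hnd hv
    simp only [List.foldl_nil, pvIts, List.filter_nil, List.map_nil, List.sum_nil, add_zero]
    exact (pv_insert_get?_self ult level _ hnd hv).symm
  | cons kv rest ih =>
    intro ult p hnd hv
    rw [List.foldl_cons]
    by_cases h : kv.1 ≥ t
    · have e1 : pvInnerStep t level ult kv
          = ult.insert level (PySem.Dict.ofList
              [("base_num", p.1 + kv.2.1), ("read_num", p.2 + kv.2.2)]) := by
        simp only [pvInnerStep, if_pos h, pv_modify_eq,
          PySem.Dict.getD_of_get?_eq_some ult PySem.Dict.empty hv]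
        rw [PySem.Dict.getD_of_get?_eq_some _ PySem.Dict.empty (PySem.Dict.get?_insert_self ult level _),
          PySem.Dict.insert_insert_self]
        rfl
      rw [e1, ih _ ((p.1 + kv.2.1, p.2 + kv.2.2) : Int × Int)
            (PySem.Dict.nodup_keys_insert _ _ _ hnd)
            (PySem.Dict.get?_insert_self ult level _),
          PySem.Dict.insert_insert_self, pvIts_cons, if_pos h]
      have c1 : ((p.1 + kv.2.1, p.2 + kv.2.2) + pvIts t rest : Int × Int).1
          = (p + (kv.2 + pvIts t rest)).1 := by simp; ring
      have c2 : ((p.1 + kv.2.1, p.2 + kv.2.2) + pvIts t rest : Int × Int).2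
          = (p + (kv.2 + pvIts t rest)).2 := by simp; ring
      rw [c1, c2]
    · rw [show pvInnerStep t level ult kv = ult from by simp [pvInnerStep, h],
        ih _ p hnd hv, pvIts_cons, if_neg h, zero_add]

lemma pv_outer (data : PySem.Dict Int (Int × Int)) :
    ∀ (ts : List Int) (ult : PySem.Dict String (PySem.Dict String Int)),
      (ult.keys ++ ts.map pvLevel).Nodup →
      (ts.foldl (pvOuterStep data) ult).items
        = ult.items ++ ts.map (fun t => (pvLevel t,
            PySem.Dict.ofList [("base_num", (pvIts t data.items).1),
                               ("read_num", (pvIts t data.items).2)])) := by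
  intro ts
  induction ts with
  | nil => intro ult _; simp
  | cons t ts ih =>
    intro ult hnd
    have hmem : pvLevel t ∉ ult.keys := by
      intro hm
      exact (List.disjoint_of_nodup_append hnd) hm (by simp)
    have hc : ult.contains (pvLevel t) = false := by
      rw [PySem.Dict.contains_eq_decide_mem_keys]; simp [hmem]
    have hndl : ult.keys.Nodup := hnd.of_append_left
    have e : pvOuterStep data ult t
        = ult.insert (pvLevel t) (PySem.Dict.ofList
            [("base_num", (pvIts t data.items).1), ("read_num", (pvIts t data.items).2)]) := by
      simp only [pvOuterStep]
      rw [PySem.Dict.setdefault_of_not_contains _ _ hc,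
        pv_inner t (pvLevel t) data.items _ ((0, 0) : Int × Int)
          (PySem.Dict.nodup_keys_insert _ _ _ hndl)
          (PySem.Dict.get?_insert_self ult (pvLevel t) _),
        PySem.Dict.insert_insert_self]
      norm_num
    rw [List.foldl_cons, e,
      ih _ (by
        rw [PySem.Dict.keys_insert_of_not_contains _ _ hc]
        simpa using hnd),
      PySem.Dict.items_insert_of_not_contains _ _ hc]
    simp

lemma pv_alt_outer (xs : List Int) :
    ∀ (ts : List Int) (res : PySem.Dict String (PySem.Dict String Int)),
      (res.keys ++ ts.map pvLevel).Nodup →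
      (ts.foldl (fun result threshold =>
          let s := xs.foldl (pvAltStep threshold) (0, 0)
          result.insert (pvLevel threshold)
            (PySem.Dict.ofList [("base_num", s.1), ("read_num", s.2)])) res).items
        = res.items ++ ts.map (fun t => (pvLevel t,
            PySem.Dict.ofList [("base_num", (pvDir t xs).1), ("read_num", (pvDir t xs).2)])) := by
  intro ts
  induction ts with
  | nil => intro res _; simp
  | cons t ts ih =>
    intro res hnd
    have hmem : pvLevel t ∉ res.keys := by
      intro hm
      exact (List.disjoint_of_nodup_append hnd) hm (by simp)
    have hc : res.contains (pvLevel t) = false := by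
      rw [PySem.Dict.contains_eq_decide_mem_keys]; simp [hmem]
    rw [List.foldl_cons]
    simp only [pv_alt_fold t xs ((0, 0) : Int × Int), zero_add]
    rw [ih _ (by
        rw [PySem.Dict.keys_insert_of_not_contains _ _ hc]
        simpa using hnd),
      PySem.Dict.items_insert_of_not_contains _ _ hc]
    simp

lemma pv_main : ∀ xs : List Int, ultralong xs = ultralong_alt xs := by
  intro xs
  simp only [ultralong, ultralong_alt]
  rw [pv_outer _ _ _ (by decide), pv_alt_outer xs _ _ (by decide),
    (rfl : (PySem.Dict.empty : PySem.Dict String (PySem.Dict String Int)).items = [])]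
  refine congrArg (List.map (fun p : String × PySem.Dict String Int => (p.1, p.2.items))) ?_
  refine congrArg (PySem.Dict.empty.items ++ ·) ?_
  refine List.map_congr_left (fun t _ => ?_)
  have hb : pvIts t ((xs.foldl pvDataStep PySem.Dict.empty).items) = pvDir t xs := by
    rw [pvIts_build t xs PySem.Dict.empty (by decide)]
    show (0 : Int × Int) + pvDir t xs = pvDir t xs
    rw [zero_add]
  rw [hb]

-- ===== VERDICT (by name: the statement is the Claim_ definition above) =====
theorem ultralong_spec : Claim_equal_ultralong := fun xs _ => pv_main xs
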